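-- pv_equiv track=rewrite | github.com/ZasshuNeko/OC-Projet_5 | class_requete.py | crea_list_field
-- ===== SOURCE A (Python) =====
-- def crea_list_field(value):
--     liste_field = ["nutriments", "url"]
--     liste_field_test = ["grade", "product_name"]
--     for field in liste_field_test:
--         for key in value.keys():
--             if field in key and value.get(key):
--                 liste_field.append(key)
--                 break
--     return liste_field
-- ===== SOURCE B (Python) =====
-- def crea_list_field(value):
--     fields = ("grade", "product_name")
--     found = {}
--     for key, val in value.items():
--         for field in fields:
--             if field not in found and field in key and val:
--                 found[field] = key
--     return ["nutriments", "url"] + [found[f] for f in fields if f in found]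
-- ===== Notes on version B (the rewrite author's own statement) =====
-- stated objective: alternative
-- what changed: Replaces A's per-field rescans of the dict keys (with a lookup per key) by a single pass over the items that fills a first-match table per field, then emits the table entries in field order.
import Mathlib
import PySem

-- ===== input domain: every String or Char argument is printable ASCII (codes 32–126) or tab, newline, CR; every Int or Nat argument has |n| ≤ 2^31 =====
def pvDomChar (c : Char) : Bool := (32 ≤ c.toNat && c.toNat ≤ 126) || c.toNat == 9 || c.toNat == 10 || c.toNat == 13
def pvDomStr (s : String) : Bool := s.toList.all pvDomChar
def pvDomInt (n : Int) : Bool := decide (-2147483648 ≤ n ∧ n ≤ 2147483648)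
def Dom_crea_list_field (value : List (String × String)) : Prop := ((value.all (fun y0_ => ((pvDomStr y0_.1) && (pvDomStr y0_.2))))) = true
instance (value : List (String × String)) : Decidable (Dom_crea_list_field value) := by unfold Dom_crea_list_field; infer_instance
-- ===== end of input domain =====

-- B replaces A's per-field rescan of the keys with one pass over the items filling a
-- first-match table, read back in field order; same results, a different traversal.


-- ===== PORT A =====
-- inner 'for key in value.keys(): if field in key and value.get(key): append; break'
def pvInnerA (d : PySem.Dict String String) (field : String) :
    List String → List String → List String
  | [], acc => acc
  | k :: ks, acc =>
      if PySem.Str.isIn field k && !((d.get? k).getD "" == "") then acc ++ [k]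
      else pvInnerA d field ks acc

def crea_list_field (value : List (String × String)) : List String :=
  let d := PySem.Dict.ofList value
  ["grade", "product_name"].foldl (fun acc field => pvInnerA d field d.keys acc)
    ["nutriments", "url"]

-- ===== PORT B =====
-- one item: record kv.1 for each field not yet found whose name it contains, if the value is truthy
def pvStepB (found : PySem.Dict String String) (kv : String × String) :
    PySem.Dict String String :=
  ["grade", "product_name"].foldl
    (fun f field =>
      if !f.contains field && (PySem.Str.isIn field kv.1 && !(kv.2 == "")) then
        f.insert field kv.1
      else f) found

def crea_list_field_alt (value : List (String × String)) : List String :=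
  let d := PySem.Dict.ofList value
  let found := d.items.foldl pvStepB PySem.Dict.empty
  ["nutriments", "url"] ++ ["grade", "product_name"].filterMap (fun f => found.get? f)

-- ===== PRECONDITION & SPEC =====
def Spec_crea_list_field (value : List (String × String)) (out : List String) : Prop := out = crea_list_field_alt value
instance (value : List (String × String)) (out : List String) : Decidable (Spec_crea_list_field value out) := by unfold Spec_crea_list_field; infer_instance

-- ===== CLAIM (what is proved, stated in full; the proofs are below) =====
def Claim_equal_crea_list_field : Prop := ∀ (value : List (String × String)), Dom_crea_list_field value → Spec_crea_list_field value (crea_list_field value)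

-- ===== LEMMAS AND PROOFS =====

-- the shared match predicate on an item
def pvP (field : String) (kv : String × String) : Bool :=
  PySem.Str.isIn field kv.1 && !(kv.2 == "")

-- A's inner scan over keys = first match over the corresponding items
theorem pvInnerA_eq (d : PySem.Dict String String) (field : String)
    (ks : List String) (acc : List String) :
    pvInnerA d field ks acc =
      acc ++ (((ks.map (fun k => (k, d.getD k ""))).find? (pvP field)).map (·.1)).toList := by
  induction ks with
  | nil => simp [pvInnerA]
  | cons k ks ih =>
      have hcond : (PySem.Str.isIn field k && !((d.get? k).getD "" == "")) =
          pvP field (k, d.getD k "") := by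
        rcases hs : d.get? k with _ | v
        · have hg : PySem.Dict.getD d k "" = "" := by simp [pysem, hs]
          simp [pvP, hg]
        · have hg : PySem.Dict.getD d k "" = v := by simp [pysem, hs]
          simp [pvP, hg]
      simp only [pvInnerA, List.map_cons, List.find?_cons, hcond]
      rcases h : pvP field (k, d.getD k "") with _ | _
      · simp [ih]
      · simp

-- lookup/contains facts for one conditional insert
theorem pvIf1_get?_self (f : PySem.Dict String String) (field x : String) (c : Bool) :
    (if (!f.contains field && c) = true then f.insert field x else f).get? field =
      (f.get? field).or (if c then some x else none) := by
  rcases hc : f.contains field with _ | _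
  · have hn : f.get? field = none := (PySem.Dict.get?_eq_none_iff_contains f field).2 hc
    rcases c <;> simp [hn, PySem.Dict.get?_insert_self]
  · rcases hs : f.get? field with _ | v
    · exact absurd ((PySem.Dict.get?_eq_none_iff_contains f field).1 hs) (by simp [hc])
    · rcases c <;> simp [hs]

theorem pvIf1_get?_ne (f : PySem.Dict String String) (field field' x : String) (c : Bool)
    (h : field' ≠ field) :
    (if (!f.contains field && c) = true then f.insert field x else f).get? field' =
      f.get? field' := by
  split
  · exact PySem.Dict.get?_insert_of_ne _ _ h
  · rfl

-- what one B step does to the table at a tracked field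
theorem pvStepB_get? (f : PySem.Dict String String) (kv : String × String)
    (field : String) (hf : field = "grade" ∨ field = "product_name") :
    (pvStepB f kv).get? field =
      (f.get? field).or (if pvP field kv then some kv.1 else none) := by
  rcases hf with h | h <;> subst h <;>
    simp only [pvStepB, List.foldl_cons, List.foldl_nil, pvP]
  · rw [pvIf1_get?_ne _ _ _ _ _ (by decide : ("grade" : String) ≠ "product_name"),
      pvIf1_get?_self]
    rfl
  · rw [pvIf1_get?_self,
      pvIf1_get?_ne _ _ _ _ _ (by decide : ("product_name" : String) ≠ "grade")]
    rfl


-- the fold over the items computes the first match per tracked field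
theorem pvFoldB_get? (l : List (String × String)) (f : PySem.Dict String String)
    (field : String) (hf : field = "grade" ∨ field = "product_name") :
    (l.foldl pvStepB f).get? field =
      (f.get? field).or ((l.find? (pvP field)).map (·.1)) := by
  induction l generalizing f with
  | nil => simp
  | cons kv l ih =>
      simp only [List.foldl_cons, List.find?_cons]
      rw [ih (pvStepB f kv) , pvStepB_get? f kv field hf]
      by_cases h : pvP field kv = true
      · simp [h]
      · simp [h]

theorem crea_list_field_spec' (value : List (String × String)) :
    crea_list_field value = crea_list_field_alt value := by
  simp only [crea_list_field, crea_list_field_alt, List.foldl_cons, List.foldl_nil,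
    List.filterMap_cons, List.filterMap_nil]
  have hud := PySem.Dict.nodup_keys_ofList (ps := value)
  have hitems := PySem.Dict.items_eq_map_keys (PySem.Dict.ofList value) hud ""
  rw [pvInnerA_eq, pvInnerA_eq,
    pvFoldB_get? _ _ "grade" (Or.inl rfl),
    pvFoldB_get? _ _ "product_name" (Or.inr rfl), hitems]
  simp only [PySem.Dict.get?_empty, Option.none_or]
  cases ((PySem.Dict.ofList value).keys.map
      (fun k => (k, (PySem.Dict.ofList value).getD k ""))).find? (pvP "grade") <;>
    cases ((PySem.Dict.ofList value).keys.map
      (fun k => (k, (PySem.Dict.ofList value).getD k ""))).find? (pvP "product_name") <;>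
    simp

-- ===== VERDICT (by name: the statement is the Claim_ definition above) =====
theorem crea_list_field_spec : Claim_equal_crea_list_field := by
  intro value _
  unfold Spec_crea_list_field
  exact crea_list_field_spec' value
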